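-- pv_equiv track=rewrite | github.com/MisterKayCodes/Mister_Predictor | services/processing/signal_pipeline_service.py | _diversify_markets
-- ===== SOURCE A (Python) =====
-- def _diversify_markets(value_markets: list, max_picks: int) -> list:
--     selected = []
--     seen_categories = set()
--
--     for vm in value_markets:
--         category = vm.get("market_key", "1x2")
--         if category not in seen_categories:
--             selected.append(vm)
--             seen_categories.add(category)
--             if len(selected) >= max_picks:
--                 break
--
--     if len(selected) < max_picks:
--         for vm in value_markets:
--             if vm not in selected:
--                 selected.append(vm)
--                 if len(selected) >= max_picks:
--                     break
--
--     return selected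
-- ===== SOURCE B (Python) =====
-- def _diversify_markets(value_markets: list, max_picks: int) -> list:
--     # decorate-sort-scan: tag each market with whether its category was already seen,
--     # stable-sort the novel-category markets to the front, then one bounded dedup scan
--     seen = set()
--     decorated = []
--     for vm in value_markets:
--         k = vm.get("market_key", "1x2")
--         decorated.append((k in seen, vm))
--         seen.add(k)
--     out = []
--     for _, vm in sorted(decorated, key=lambda t: t[0]):
--         if vm not in out:
--             out.append(vm)
--             if len(out) >= max_picks:
--                 break
--     return out
-- ===== Notes on version B (the rewrite author's own statement) =====
-- stated objective: alternative
-- what changed: A's two staged break-early loops (pick one market per category, then conditionally refill from the whole list) are replaced by a decorate-sort-scan: tag each market with a was-category-seen flag, stable-sort the novel-category markets to the front, and do one bounded dedup scan over the sorted list.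
import Mathlib
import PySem

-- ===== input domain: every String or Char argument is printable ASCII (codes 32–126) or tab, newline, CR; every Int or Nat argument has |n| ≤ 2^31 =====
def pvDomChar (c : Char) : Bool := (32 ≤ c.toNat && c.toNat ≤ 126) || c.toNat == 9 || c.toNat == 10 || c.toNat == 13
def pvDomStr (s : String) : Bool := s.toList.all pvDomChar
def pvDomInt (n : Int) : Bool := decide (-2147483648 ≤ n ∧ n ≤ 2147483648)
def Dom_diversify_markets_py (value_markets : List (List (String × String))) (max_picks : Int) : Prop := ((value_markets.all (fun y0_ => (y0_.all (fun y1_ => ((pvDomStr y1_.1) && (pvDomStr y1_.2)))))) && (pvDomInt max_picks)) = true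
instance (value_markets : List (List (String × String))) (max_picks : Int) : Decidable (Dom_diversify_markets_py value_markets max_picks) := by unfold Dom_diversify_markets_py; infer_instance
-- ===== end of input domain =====

-- B replaces A's two staged break-early loops by decorate (novelty flag per category), stable sort by the flag, and one bounded dedup scan; equal return value, no speed claim.

-- Python dict equality (`vm in selected` compares dicts by ==, ignoring order):
-- same lookups in both directions over the mentioned keys.
def pvDictEq (a b : List (String × String)) : Bool :=
  (a.all (fun p => (PySem.Dict.mk b).get? p.1 == (PySem.Dict.mk a).get? p.1)) &&
  (b.all (fun p => (PySem.Dict.mk a).get? p.1 == (PySem.Dict.mk b).get? p.1))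

-- vm.get("market_key", "1x2")
def pvCat (vm : List (String × String)) : String :=
  (PySem.Dict.mk vm).getD "market_key" "1x2"

-- ===== PORT A =====
-- first loop of A: build selected/seen, break once len(selected) >= max_picks
def pvLoopA1 (xs : List (List (String × String))) (sel : List (List (String × String)))
    (seen : PySem.Set String) (mp : Int) : List (List (String × String)) × PySem.Set String :=
  match xs with
  | [] => (sel, seen)
  | vm :: rest =>
    let category := pvCat vm
    if category ∈ seen then pvLoopA1 rest sel seen mp
    else
      let sel' := sel ++ [vm]
      let seen' := PySem.Set.add seen category
      if mp ≤ (sel'.length : Int) then (sel', seen') else pvLoopA1 rest sel' seen' mp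

-- second loop of A: fill with markets not yet selected, break once len(selected) >= max_picks
def pvLoopA2 (xs : List (List (String × String))) (sel : List (List (String × String)))
    (mp : Int) : List (List (String × String)) :=
  match xs with
  | [] => sel
  | vm :: rest =>
    if sel.any (pvDictEq vm) then pvLoopA2 rest sel mp
    else
      let sel' := sel ++ [vm]
      if mp ≤ (sel'.length : Int) then sel' else pvLoopA2 rest sel' mp

def diversify_markets_py (value_markets : List (List (String × String))) (max_picks : Int) : List (List (String × String)) :=
  let selected := (pvLoopA1 value_markets [] PySem.Set.empty max_picks).1
  if (selected.length : Int) < max_picks then pvLoopA2 value_markets selected max_picks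
  else selected

-- ===== PORT B =====
-- B's decorate pass: pair each market with 'its category was already seen' and grow seen
def pvDecor (xs : List (List (String × String))) (seen : PySem.Set String) :
    List (Bool × List (String × String)) :=
  match xs with
  | [] => []
  | vm :: rest =>
    (decide (pvCat vm ∈ seen), vm) :: pvDecor rest (PySem.Set.add seen (pvCat vm))

-- B's bounded dedup scan over the (sorted) decorated list
def pvScanB (d : List (Bool × List (String × String))) (out : List (List (String × String)))
    (mp : Int) : List (List (String × String)) :=
  match d with
  | [] => out
  | (_, vm) :: rest =>
    if out.any (pvDictEq vm) then pvScanB rest out mp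
    else
      let out' := out ++ [vm]
      if mp ≤ (out'.length : Int) then out' else pvScanB rest out' mp

def diversify_markets_py_alt (value_markets : List (List (String × String))) (max_picks : Int) : List (List (String × String)) :=
  let decorated := pvDecor value_markets PySem.Set.empty
  pvScanB (PySem.List.sorted decorated (fun t => t.1) false) [] max_picks

-- ===== PRECONDITION & SPEC =====
def Spec_diversify_markets_py (value_markets : List (List (String × String))) (max_picks : Int) (out : List (List (String × String))) : Prop := out = diversify_markets_py_alt value_markets max_picks
instance (value_markets : List (List (String × String))) (max_picks : Int) (out : List (List (String × String))) : Decidable (Spec_diversify_markets_py value_markets max_picks out) := by unfold Spec_diversify_markets_py; infer_instance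

-- ===== CLAIM (what is proved, stated in full; the proofs are below) =====
def Claim_equal_diversify_markets_py : Prop := ∀ (value_markets : List (List (String × String))) (max_picks : Int), Dom_diversify_markets_py value_markets max_picks → Spec_diversify_markets_py value_markets max_picks (diversify_markets_py value_markets max_picks)

-- ===== LEMMAS AND PROOFS =====

-- representatives: first market per distinct category, starting from `seen`
def pvRepsAux (xs : List (List (String × String))) (seen : PySem.Set String) : List (List (String × String)) :=
  match xs with
  | [] => []
  | vm :: rest =>
    if pvCat vm ∈ seen then pvRepsAux rest seen
    else vm :: pvRepsAux rest (PySem.Set.add seen (pvCat vm))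

-- append elements of r to sel, stopping as soon as the length reaches mp
def pvTrunc (sel r : List (List (String × String))) (mp : Int) : List (List (String × String)) :=
  match r with
  | [] => sel
  | v :: rest =>
    let sel' := sel ++ [v]
    if mp ≤ (sel'.length : Int) then sel' else pvTrunc sel' rest mp

-- pvScanB specialised to a bare dict list (proof-side skeleton shared by both sides)
def pvScanD (xs : List (List (String × String))) (result : List (List (String × String)))
    (mp : Int) : List (List (String × String)) :=
  match xs with
  | [] => result
  | vm :: rest =>
    if result.any (pvDictEq vm) then pvScanD rest result mp
    else
      let result' := result ++ [vm]
      if mp ≤ (result'.length : Int) then result' else pvScanD rest result' mp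

theorem pvDictEq_refl (a : List (String × String)) : pvDictEq a a = true := by
  simp [pvDictEq]

theorem pvDictEq_comm (a b : List (String × String)) : pvDictEq a b = pvDictEq b a := by
  simp [pvDictEq, Bool.and_comm]

theorem pvGet_some_key {a : List (String × String)} {k v : String}
    (h : (PySem.Dict.mk a).get? k = some v) : ∃ p ∈ a, p.1 = k := by
  induction a with
  | nil => simp [PySem.Dict.get?] at h
  | cons p rest ih =>
    obtain ⟨k', v'⟩ := p
    rw [PySem.Dict.get?_mk_cons] at h
    by_cases hk : k' = k
    · exact ⟨(k', v'), List.mem_cons_self, hk⟩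
    · simp [hk] at h
      obtain ⟨q, hq, hqk⟩ := ih h
      exact ⟨q, List.mem_cons_of_mem _ hq, hqk⟩

theorem pvGet_eq_of_pvDictEq {a b : List (String × String)} (h : pvDictEq a b = true) (k : String) :
    (PySem.Dict.mk a).get? k = (PySem.Dict.mk b).get? k := by
  unfold pvDictEq at h
  rw [Bool.and_eq_true, List.all_eq_true, List.all_eq_true] at h
  obtain ⟨h1, h2⟩ := h
  cases hga : (PySem.Dict.mk a).get? k with
  | some v =>
    obtain ⟨p, hp, hpk⟩ := pvGet_some_key hga
    have hx := h1 p hp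
    rw [beq_iff_eq, hpk] at hx
    rw [hx, hga]
  | none =>
    cases hgb : (PySem.Dict.mk b).get? k with
    | none => rfl
    | some w =>
      obtain ⟨p, hp, hpk⟩ := pvGet_some_key hgb
      have hx := h2 p hp
      rw [beq_iff_eq, hpk, hga, hgb] at hx
      exact absurd hx (by simp)

theorem pvCat_eq_of_pvDictEq {a b : List (String × String)} (h : pvDictEq a b = true) :
    pvCat a = pvCat b := by
  simp [pvCat, PySem.Dict.getD_eq_get?_getD, pvGet_eq_of_pvDictEq h "market_key"]

theorem pvCat_mem_of_mem_repsAux {v : List (String × String)} {xs : List (List (String × String))}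
    {seen : PySem.Set String} (h : v ∈ pvRepsAux xs seen) : pvCat v ∉ seen := by
  induction xs generalizing seen with
  | nil => simp [pvRepsAux] at h
  | cons vm rest ih =>
    rw [pvRepsAux] at h
    by_cases hc : pvCat vm ∈ seen
    · rw [if_pos hc] at h
      exact ih h
    · rw [if_neg hc] at h
      rcases List.mem_cons.1 h with rfl | htail
      · exact hc
      · have hx := ih htail
        rw [PySem.Set.mem_add] at hx
        push_neg at hx
        exact hx.1

theorem pairwise_repsAux (xs : List (List (String × String))) (seen : PySem.Set String) :
    (pvRepsAux xs seen).Pairwise (fun a b => pvDictEq a b = false) := by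
  induction xs generalizing seen with
  | nil => simp [pvRepsAux]
  | cons vm rest ih =>
    rw [pvRepsAux]
    by_cases hc : pvCat vm ∈ seen
    · rw [if_pos hc]
      exact ih seen
    · rw [if_neg hc]
      refine List.Pairwise.cons ?_ (ih _)
      intro w hw
      cases hEq : pvDictEq vm w with
      | false => rfl
      | true =>
        exfalso
        have hcats := pvCat_eq_of_pvDictEq hEq
        have hnot := pvCat_mem_of_mem_repsAux hw
        rw [PySem.Set.mem_add] at hnot
        push_neg at hnot
        exact hnot.2 hcats.symm

theorem pvLoopA1_eq (xs : List (List (String × String))) (sel : List (List (String × String)))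
    (seen : PySem.Set String) (mp : Int) :
    (pvLoopA1 xs sel seen mp).1 = pvTrunc sel (pvRepsAux xs seen) mp := by
  induction xs generalizing sel seen with
  | nil => rfl
  | cons vm rest ih =>
    rw [pvLoopA1, pvRepsAux]
    by_cases hc : pvCat vm ∈ seen
    · rw [if_pos hc, if_pos hc]
      exact ih sel seen
    · rw [if_neg hc, if_neg hc, pvTrunc]
      by_cases hlen : mp ≤ ((sel ++ [vm]).length : Int)
      · simp only [if_pos hlen]
      · simp only [if_neg hlen]
        exact ih (sel ++ [vm]) _

theorem pvLoopA2_eq_pvScanD (xs sel : List (List (String × String))) (mp : Int) :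
    pvLoopA2 xs sel mp = pvScanD xs sel mp := by
  induction xs generalizing sel with
  | nil => rfl
  | cons vm rest ih =>
    rw [pvLoopA2, pvScanD]
    by_cases hm : sel.any (pvDictEq vm)
    · rw [if_pos hm, if_pos hm]
      exact ih sel
    · rw [if_neg hm, if_neg hm]
      by_cases hlen : mp ≤ ((sel ++ [vm]).length : Int)
      · simp only [if_pos hlen]
      · simp only [if_neg hlen]
        exact ih (sel ++ [vm])

-- skip lemma: elements of the list that are value-equal to something already in sel are no-ops
theorem pvLoopA2_skip (d : List (Bool × List (String × String)))
    (sel : List (List (String × String))) (mp : Int)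
    (h : ∀ p ∈ d, p.1 = false → sel.any (pvDictEq p.2) = true) :
    pvLoopA2 (d.map (fun t => t.2)) sel mp = pvLoopA2 ((d.filter (fun t => t.1)).map (fun t => t.2)) sel mp := by
  induction d generalizing sel with
  | nil => rfl
  | cons p d ih =>
    obtain ⟨b, vm⟩ := p
    cases b with
    | false =>
      have hin : sel.any (pvDictEq vm) = true := h (false, vm) List.mem_cons_self rfl
      simp only [List.map_cons, List.filter_cons]
      rw [pvLoopA2, if_pos hin]
      simp only [decide_false, Bool.false_eq_true, if_false]
      exact ih sel (fun q hq => h q (List.mem_cons_of_mem _ hq))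
    | true =>
      simp only [List.map_cons, List.filter_cons, decide_true, if_true, List.map_cons]
      rw [pvLoopA2, pvLoopA2]
      by_cases hm : sel.any (pvDictEq vm)
      · rw [if_pos hm, if_pos hm]
        exact ih sel (fun q hq => h q (List.mem_cons_of_mem _ hq))
      · rw [if_neg hm, if_neg hm]
        by_cases hlen : mp ≤ ((sel ++ [vm]).length : Int)
        · simp only [if_pos hlen]
        · simp only [if_neg hlen]
          refine ih (sel ++ [vm]) (fun q hq hq1 => ?_)
          rw [List.any_append, h q (List.mem_cons_of_mem _ hq) hq1]
          rfl

theorem pvScanB_eq_pvScanD (d : List (Bool × List (String × String)))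
    (out : List (List (String × String))) (mp : Int) :
    pvScanB d out mp = pvScanD (d.map (fun t => t.2)) out mp := by
  induction d generalizing out with
  | nil => rfl
  | cons p d ih =>
    obtain ⟨b, vm⟩ := p
    rw [List.map_cons, pvScanB, pvScanD]
    by_cases hm : out.any (pvDictEq vm)
    · rw [if_pos hm, if_pos hm]
      exact ih out
    · rw [if_neg hm, if_neg hm]
      by_cases hlen : mp ≤ ((out ++ [vm]).length : Int)
      · simp only [if_pos hlen]
      · simp only [if_neg hlen]
        exact ih (out ++ [vm])

-- the decorated list forgets the flags back to the input
theorem pvDecor_map_snd (xs : List (List (String × String))) (seen : PySem.Set String) :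
    (pvDecor xs seen).map (fun t => t.2) = xs := by
  induction xs generalizing seen with
  | nil => rfl
  | cons vm rest ih =>
    rw [pvDecor, List.map_cons, ih]

theorem pvSet_add_of_mem {seen : PySem.Set String} {c : String} (hc : c ∈ seen) :
    PySem.Set.add seen c = seen := by
  simp [PySem.Set.add, hc]

-- the false-flag (novel-category) part of the decorated list is exactly the representatives
theorem pvDecor_filter_false (xs : List (List (String × String))) (seen : PySem.Set String) :
    ((pvDecor xs seen).filter (fun t => !t.1)).map (fun t => t.2) = pvRepsAux xs seen := by
  induction xs generalizing seen with
  | nil => rfl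
  | cons vm rest ih =>
    rw [pvDecor, pvRepsAux, List.filter_cons]
    by_cases hc : pvCat vm ∈ seen
    · rw [if_pos hc]
      simp only [hc, decide_true, Bool.not_true, Bool.false_eq_true, if_false]
      rw [pvSet_add_of_mem hc]
      exact ih seen
    · rw [if_neg hc]
      simp only [hc, decide_false, Bool.not_false, if_true, List.map_cons]
      rw [ih]

-- stable insertion of a false-flag element lands right after the false-flag block
theorem pvInsert_false {α : Type} (x : Bool × α) (F T : List (Bool × α))
    (hx : x.1 = false) (hF : ∀ f ∈ F, f.1 = false) (hT : ∀ t ∈ T, t.1 = true) :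
    PySem.List.insertBy (fun a b => decide (a.1 < b.1)) x (F ++ T) = F ++ x :: T := by
  induction F with
  | nil =>
    cases T with
    | nil => rfl
    | cons t T' =>
      rw [List.nil_append, PySem.List.insertBy]
      rw [if_pos (by rw [hx, hT t List.mem_cons_self]; decide)]
      rfl
  | cons f F' ih =>
    rw [List.cons_append, PySem.List.insertBy]
    rw [if_neg (by rw [hx, hF f List.mem_cons_self]; decide)]
    rw [ih (fun g hg => hF g (List.mem_cons_of_mem _ hg))]
    rfl

-- a true-flag element always goes to the end
theorem pvInsert_true {α : Type} (x : Bool × α) (L : List (Bool × α)) (hx : x.1 = true) :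
    PySem.List.insertBy (fun a b => decide (a.1 < b.1)) x L = L ++ [x] := by
  refine PySem.List.insertBy_of_forall_not_before _ _ _ (fun y _ => ?_)
  rw [hx]
  cases hy : y.1 <;> decide

theorem pvSorted_foldl {α : Type} (d F T : List (Bool × α))
    (hF : ∀ f ∈ F, f.1 = false) (hT : ∀ t ∈ T, t.1 = true) :
    d.foldl (fun acc x => PySem.List.insertBy (fun a b => decide (a.1 < b.1)) x acc) (F ++ T)
      = (F ++ d.filter (fun t => !t.1)) ++ (T ++ d.filter (fun t => t.1)) := by
  induction d generalizing F T with
  | nil => simp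
  | cons x d ih =>
    rw [List.foldl_cons, List.filter_cons, List.filter_cons]
    cases hx : x.1 with
    | false =>
      rw [pvInsert_false x F T hx hF hT]
      have : F ++ x :: T = (F ++ [x]) ++ T := by simp
      rw [this, ih (F ++ [x]) T ?_ hT]
      · simp [hx]
      · intro f hf
        rcases List.mem_append.1 hf with hf | hf
        · exact hF f hf
        · rw [List.mem_singleton.1 hf]; exact hx
    | true =>
      rw [pvInsert_true x (F ++ T) hx, List.append_assoc]
      rw [ih F (T ++ [x]) hF ?_]
      · simp [hx]
      · intro t ht
        rcases List.mem_append.1 ht with ht | ht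
        · exact hT t ht
        · rw [List.mem_singleton.1 ht]; exact hx

-- stable sort by the Bool flag = false-flag block then true-flag block, each in input order
theorem pvSorted_flag {α : Type} (d : List (Bool × α)) :
    PySem.List.sorted d (fun t => t.1) false
      = d.filter (fun t => !t.1) ++ d.filter (fun t => t.1) := by
  rw [PySem.List.sorted_eq_foldl_insertBy]
  have h := pvSorted_foldl d [] [] (by simp) (by simp)
  simpa using h

theorem pvTrunc_length {sel r : List (List (String × String))} {mp : Int}
    (hr : r ≠ []) (h : mp ≤ (sel.length + r.length : Int)) :
    mp ≤ ((pvTrunc sel r mp).length : Int) := by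
  induction r generalizing sel with
  | nil => exact absurd rfl hr
  | cons v rest ih =>
    rw [pvTrunc]
    by_cases hlen : mp ≤ ((sel ++ [v]).length : Int)
    · rw [if_pos hlen]
      exact hlen
    · rw [if_neg hlen]
      rcases rest with _ | ⟨w, rest'⟩
      · exfalso
        simp only [List.length_cons, List.length_append, List.length_nil] at h hlen
        push_cast at h hlen
        omega
      · refine ih (by simp) ?_
        simp only [List.length_cons, List.length_append, List.length_nil] at h hlen ⊢
        push_cast at h hlen ⊢
        omega

theorem pvTrunc_of_lt {sel r : List (List (String × String))} {mp : Int}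
    (h : (sel.length + r.length : Int) < mp) : pvTrunc sel r mp = sel ++ r := by
  induction r generalizing sel with
  | nil => simp [pvTrunc]
  | cons v rest ih =>
    rw [pvTrunc]
    have hlen : ¬ mp ≤ ((sel ++ [v]).length : Int) := by
      simp only [List.length_cons, List.length_append, List.length_nil] at h ⊢
      push_cast at h ⊢
      omega
    rw [if_neg hlen, ih ?_]
    · simp
    · simp only [List.length_cons, List.length_append, List.length_nil] at h ⊢
      push_cast at h ⊢
      omega

theorem pvScanD_split_stop {r : List (List (String × String))} (ys : List (List (String × String)))
    {result : List (List (String × String))} {mp : Int}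
    (hmem : ∀ v ∈ r, result.any (pvDictEq v) = false)
    (hpw : r.Pairwise (fun a b => pvDictEq a b = false))
    (hr : r ≠ []) (h : mp ≤ (result.length + r.length : Int)) :
    pvScanD (r ++ ys) result mp = pvTrunc result r mp := by
  induction r generalizing result with
  | nil => exact absurd rfl hr
  | cons v rest ih =>
    rw [List.cons_append, pvScanD, pvTrunc]
    rw [if_neg (by rw [hmem v List.mem_cons_self]; simp)]
    by_cases hlen : mp ≤ ((result ++ [v]).length : Int)
    · simp only [if_pos hlen]
    · simp only [if_neg hlen]
      rcases rest with _ | ⟨w, rest'⟩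
      · exfalso
        simp only [List.length_cons, List.length_append, List.length_nil] at h hlen
        push_cast at h hlen
        omega
      · refine ih ?_ hpw.of_cons (by simp) ?_
        · intro u hu
          rw [List.any_append]
          have h1 := hmem u (List.mem_cons_of_mem _ hu)
          have h2 : pvDictEq u v = false := by
            rw [pvDictEq_comm]
            exact List.rel_of_pairwise_cons hpw hu
          simp [h1, h2]
        · simp only [List.length_cons, List.length_append, List.length_nil] at h hlen ⊢
          push_cast at h hlen ⊢
          omega

theorem pvScanD_split_go {r : List (List (String × String))} (ys : List (List (String × String)))
    {result : List (List (String × String))} {mp : Int}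
    (hmem : ∀ v ∈ r, result.any (pvDictEq v) = false)
    (hpw : r.Pairwise (fun a b => pvDictEq a b = false))
    (h : (result.length + r.length : Int) < mp) :
    pvScanD (r ++ ys) result mp = pvScanD ys (result ++ r) mp := by
  induction r generalizing result with
  | nil => simp
  | cons v rest ih =>
    rw [List.cons_append, pvScanD]
    rw [if_neg (by rw [hmem v List.mem_cons_self]; simp)]
    have hlen : ¬ mp ≤ ((result ++ [v]).length : Int) := by
      simp only [List.length_cons, List.length_append, List.length_nil] at h ⊢
      push_cast at h ⊢
      omega
    rw [if_neg hlen]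
    have hstep := ih (result := result ++ [v]) ?_ hpw.of_cons ?_
    · rw [hstep, List.append_assoc]
      rfl
    · intro u hu
      rw [List.any_append]
      have h1 := hmem u (List.mem_cons_of_mem _ hu)
      have h2 : pvDictEq u v = false := by
        rw [pvDictEq_comm]
        exact List.rel_of_pairwise_cons hpw hu
      simp [h1, h2]
    · simp only [List.length_cons, List.length_append, List.length_nil] at h ⊢
      push_cast at h ⊢
      omega

-- ===== VERDICT (by name: the statement is the Claim_ definition above) =====
theorem diversify_markets_py_spec : Claim_equal_diversify_markets_py := by
  intro vms mp _hdom
  unfold Spec_diversify_markets_py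
  simp only [diversify_markets_py, diversify_markets_py_alt]
  rw [pvLoopA1_eq, pvScanB_eq_pvScanD, pvSorted_flag, List.map_append, pvDecor_filter_false]
  cases vms with
  | nil =>
    simp only [pvRepsAux, pvDecor, pvTrunc, pvScanD, List.length_nil, List.filter_nil,
      List.map_nil, List.append_nil]
    split
    · rfl
    · rfl
  | cons v rest =>
    have hRne : pvRepsAux (v :: rest) PySem.Set.empty ≠ [] := by
      rw [pvRepsAux, if_neg (by simp [PySem.Set.empty])]
      simp
    set dec := pvDecor (v :: rest) PySem.Set.empty with hdec
    set reps := pvRepsAux (v :: rest) PySem.Set.empty with hreps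
    set dups := (dec.filter (fun t => t.1)).map (fun t => t.2) with hdups
    by_cases hmp : mp ≤ ((reps.length : Int))
    · rw [pvScanD_split_stop dups (fun w _ => rfl) (pairwise_repsAux _ _) hRne (by simpa using hmp)]
      rw [if_neg (by push_neg; exact pvTrunc_length hRne (by simpa using hmp))]
    · push_neg at hmp
      rw [pvScanD_split_go dups (fun w _ => rfl) (pairwise_repsAux _ _) (by simpa using hmp)]
      rw [pvTrunc_of_lt (by simpa using hmp), if_pos (by exact_mod_cast hmp), List.nil_append]
      have hxs : (v :: rest) = dec.map (fun t => t.2) := (pvDecor_map_snd _ _).symm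
      calc pvLoopA2 (v :: rest) reps mp
          = pvLoopA2 (dec.map (fun t => t.2)) reps mp := by rw [← hxs]
        _ = pvLoopA2 dups reps mp := by
              rw [hdups]
              refine pvLoopA2_skip dec reps mp (fun p hp hp1 => ?_)
              have hmem : p.2 ∈ reps := by
                rw [hreps, ← pvDecor_filter_false (v :: rest) PySem.Set.empty, ← hdec]
                exact List.mem_map.2 ⟨p, List.mem_filter.2 ⟨hp, by rw [hp1]; rfl⟩, rfl⟩
              exact List.any_eq_true.2 ⟨p.2, hmem, pvDictEq_refl _⟩
        _ = pvScanD dups reps mp := pvLoopA2_eq_pvScanD _ _ _
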